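-- pv_equiv track=rewrite | github.com/mchez808/codewars | seven_kyu.py | alpha_seq
-- ===== SOURCE A (Python) =====
-- def alpha_seq(string):
--     """In this kata you will be given a random string of letters and tasked with
--     returning them as a string of comma-separated sequences sorted alphabetcally,
--     with each sequence starting with an uppercase character followed by n-1
--     lowercase characters, where n is the letter's alphabet position 1-26.
--
--     Example
--     alpha_seq("ZpglnRqenU") -> "Eeeee,Ggggggg,Llllllllllll,Nnnnnnnnnnnnnn,Nnnnnnnnnnnnnn,Pppppppppppppppp,Qqqqqqqqqqqqqqqqq,Rrrrrrrrrrrrrrrrrr,Uuuuuuuuuuuuuuuuuuuuu,Zzzzzzzzzzzzzzzzzzzzzzzzzz"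
--
--     Technical Details:
--     - The string will include only letters.
--     - The first letter of each sequence is uppercase followed by n-1 lowercase.
--     - Each sequence is seperated with a comma.
--     - Return value needs to be a string.
--
--     https://www.codewars.com/kata/alphabetical-sequence/train/python
--     """
--     list_out, list_str = [], []
--     list_str.extend(string.upper())
--     list_str.sort()
--
--     ALPHABET = "ABCDEFGHIJKLMNOPQRSTUVWXYZ"
--
--     for letter in list_str:
--         number_of_trailing_letters = ALPHABET.find(letter)
--         # str_same_letter example: "Eeeee"
--         str_same_letter = letter.upper() + letter.lower()*number_of_trailing_letters
--         list_out.append(str_same_letter)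
--     output_string = ",".join(list_out)
--     return output_string
-- ===== SOURCE B (Python) =====
-- ALPHABET = "ABCDEFGHIJKLMNOPQRSTUVWXYZ"
--
--
-- def alpha_seq(string):
--     # Counting sort: tally the uppercased characters once, then walk the
--     # ASCII codes in increasing order, emitting each character's sequence
--     # (the character followed by alphabet-position-1 lowercase copies)
--     # count times; no comparison sort is performed.
--     counts = {}
--     for ch in string.upper():
--         counts[ch] = counts.get(ch, 0) + 1
--     parts = []
--     for code in range(128):
--         ch = chr(code)
--         parts.extend([ch + ch.lower() * ALPHABET.find(ch)] * counts.get(ch, 0))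
--     return ",".join(parts)
-- ===== Notes on version B (the rewrite author's own statement) =====
-- stated objective: faster
-- what changed: B replaces A's comparison sort of the uppercased characters by a counting sort: it tallies the uppercased characters in a dict in one pass, then walks the ASCII codes in increasing order, emitting count copies of each character's alphabet-position sequence, so no sort is performed.
import Mathlib
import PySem

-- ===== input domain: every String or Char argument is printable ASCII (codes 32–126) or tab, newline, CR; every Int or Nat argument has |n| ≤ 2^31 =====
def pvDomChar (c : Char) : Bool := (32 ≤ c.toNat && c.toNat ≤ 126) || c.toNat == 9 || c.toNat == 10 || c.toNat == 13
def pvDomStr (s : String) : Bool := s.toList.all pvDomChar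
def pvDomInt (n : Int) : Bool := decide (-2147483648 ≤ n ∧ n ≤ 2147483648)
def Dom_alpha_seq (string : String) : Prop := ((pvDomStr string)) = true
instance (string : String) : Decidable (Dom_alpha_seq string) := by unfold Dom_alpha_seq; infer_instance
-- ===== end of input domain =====

-- B replaces A's comparison sort by a counting sort (tally uppercased characters, walk the ASCII codes in order); same return value on the domain.

-- ===== PORT A =====
def alpha_seq (string : String) : String :=
  let list_str := PySem.List.sorted (PySem.Chars.upper string.toList) (fun c => c) false
  let ALPHABET := "ABCDEFGHIJKLMNOPQRSTUVWXYZ".toList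
  let list_out := list_str.foldl (fun list_out letter =>
    let number_of_trailing_letters := PySem.Chars.find ALPHABET [letter]
    let str_same_letter := [PySem.Chars.upperChar letter] ++
      PySem.List.pyRepeat [PySem.Chars.lowerChar letter] number_of_trailing_letters
    list_out ++ [str_same_letter]) ([] : List (List Char))
  String.ofList (PySem.Chars.join [','] list_out)

-- ===== PORT B =====
def alpha_seq_alt (string : String) : String :=
  let counts := (PySem.Chars.upper string.toList).foldl
    (fun counts ch => counts.insert ch (counts.getD ch 0 + 1))
    (PySem.Dict.empty : PySem.Dict Char Int)
  let parts := (PySem.List.pyRange 0 128 1).foldl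
    (fun parts code =>
      -- chr(code) is exact as Char.ofNat code.toNat here: 0 ≤ code < 128
      let ch := Char.ofNat code.toNat
      parts ++ PySem.List.pyRepeat
        [[ch] ++ PySem.List.pyRepeat [PySem.Chars.lowerChar ch]
          (PySem.Chars.find "ABCDEFGHIJKLMNOPQRSTUVWXYZ".toList [ch])]
        (counts.getD ch 0))
    ([] : List (List Char))
  String.ofList (PySem.Chars.join [','] parts)

-- ===== PRECONDITION & SPEC =====
def Spec_alpha_seq (string : String) (out : String) : Prop := out = alpha_seq_alt string
instance (string : String) (out : String) : Decidable (Spec_alpha_seq string out) := by unfold Spec_alpha_seq; infer_instance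

-- ===== CLAIM (what is proved, stated in full; the proofs are below) =====
def Claim_equal_alpha_seq : Prop := ∀ (string : String), Dom_alpha_seq string → Spec_alpha_seq string (alpha_seq string)

-- ===== LEMMAS AND PROOFS =====

-- the sequence A emits for one (already uppercased) character
def pvSeqA (c : Char) : List Char :=
  [PySem.Chars.upperChar c] ++
    PySem.List.pyRepeat [PySem.Chars.lowerChar c]
      (PySem.Chars.find "ABCDEFGHIJKLMNOPQRSTUVWXYZ".toList [c])

-- the sequence B emits for character code k
def pvSeqB (k : Nat) : List Char :=
  [Char.ofNat k] ++
    PySem.List.pyRepeat [PySem.Chars.lowerChar (Char.ofNat k)]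
      (PySem.Chars.find "ABCDEFGHIJKLMNOPQRSTUVWXYZ".toList [Char.ofNat k])

-- counting-sort image of u restricted to codes < n
def pvCanon (u : List Char) (n : Nat) : List Char :=
  (List.range n).flatMap (fun k => List.replicate (u.count (Char.ofNat k)) (Char.ofNat k))

theorem pvToNat_ofNat : ∀ k : Nat, k < 128 → (Char.ofNat k).toNat = k := by decide

theorem pvOfNat_eq_iff (k : Nat) (hk : k < 128) (c : Char) :
    Char.ofNat k = c ↔ c.toNat = k := by
  constructor
  · rintro rfl; exact pvToNat_ofNat k hk
  · rintro rfl; exact Char.ofNat_toNat c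

theorem pvCount_canon (u : List Char) (c : Char) :
    ∀ n : Nat, n ≤ 128 → (pvCanon u n).count c = if c.toNat < n then u.count c else 0 := by
  intro n
  induction n with
  | zero => simp [pvCanon]
  | succ m ih =>
    intro h
    have hm : m ≤ 128 := by omega
    simp only [pvCanon, List.range_succ, List.flatMap_append, List.count_append]
    rw [show ((List.flatMap (fun k => List.replicate (u.count (Char.ofNat k)) (Char.ofNat k)) (List.range m)).count c) = (pvCanon u m).count c from rfl, ih hm]
    simp only [List.flatMap_cons, List.flatMap_nil, List.append_nil, List.count_replicate]
    by_cases hc : c.toNat = m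
    · have he : Char.ofNat m = c := (pvOfNat_eq_iff m (by omega) c).mpr hc
      simp only [he, BEq.rfl, if_true]
      rw [if_neg (by omega), if_pos (by omega)]
      omega
    · have hne : (Char.ofNat m == c) = false :=
        beq_eq_false_iff_ne.mpr (fun he => hc ((pvOfNat_eq_iff m (by omega) c).mp he))
      rw [hne]
      simp only [Bool.false_eq_true, if_false, add_zero]
      by_cases h1 : c.toNat < m
      · rw [if_pos h1, if_pos (by omega)]
      · rw [if_neg h1, if_neg (by omega)]

theorem pvPairwise_canon (u : List Char) :
    ∀ n : Nat, n ≤ 128 → (pvCanon u n).Pairwise (· ≤ ·) := by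
  intro n
  induction n with
  | zero => simp [pvCanon]
  | succ m ih =>
    intro h
    simp only [pvCanon, List.range_succ, List.flatMap_append, List.flatMap_cons,
      List.flatMap_nil, List.append_nil]
    rw [List.pairwise_append]
    refine ⟨ih (by omega), List.pairwise_replicate.mpr (Or.inr le_rfl), ?_⟩
    intro a ha b hb
    obtain ⟨k, hk, hmem⟩ := List.mem_flatMap.mp ha
    have hklt : k < m := List.mem_range.mp hk
    have ha' : a = Char.ofNat k := List.eq_of_mem_replicate hmem
    have hb' : b = Char.ofNat m := List.eq_of_mem_replicate hb
    subst ha' hb'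
    have h1 := pvToNat_ofNat k (by omega)
    have h2 := pvToNat_ofNat m (by omega)
    rw [Char.le_def, UInt32.le_iff_toNat_le]
    change (Char.ofNat k).toNat ≤ (Char.ofNat m).toNat
    omega

theorem pvSorted_eq_canon (u : List Char) (hlt : ∀ c ∈ u, c.toNat < 128) :
    PySem.List.sorted u (fun c => c) false = pvCanon u 128 := by
  apply PySem.List.sorted_id_eq_of_perm_of_pairwise
  · apply List.perm_iff_count.mpr
    intro c
    rw [pvCount_canon u c 128 le_rfl]
    by_cases hc : c.toNat < 128
    · rw [if_pos hc]
    · rw [if_neg hc]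
      exact (List.count_eq_zero.mpr (fun hm => hc (hlt c hm))).symm
  · exact pvPairwise_canon u 128 le_rfl

set_option maxRecDepth 40000 in
theorem pvSeq_eq : ∀ k : Nat, k < 128 → ¬ (97 ≤ k ∧ k ≤ 122) →
    pvSeqA (Char.ofNat k) = pvSeqB k := by decide

theorem pvUpDom (c : Char) (h : c.toNat ≤ 126) :
    (PySem.Chars.upperChar c).toNat < 128 ∧
    ¬ (97 ≤ (PySem.Chars.upperChar c).toNat ∧ (PySem.Chars.upperChar c).toNat ≤ 122) := by
  simp only [PySem.Chars.upperChar, PySem.Chars.islower]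
  by_cases hl : 'a' ≤ c ∧ c ≤ 'z'
  · have h97 : 97 ≤ c.toNat := by
      have := hl.1; rw [Char.le_def] at this; exact this
    have h122 : c.toNat ≤ 122 := by
      have := hl.2; rw [Char.le_def] at this; exact this
    have hv := pvToNat_ofNat (c.toNat - 32) (by omega)
    simp only [hl.1, hl.2, decide_true, Bool.and_self, if_true, hv]
    omega
  · have : ¬ (decide ('a' ≤ c) && decide (c ≤ 'z')) = true := by
      simp only [Bool.and_eq_true, decide_eq_true_eq]; exact hl
    rw [if_neg this]
    have : ¬ (97 ≤ c.toNat ∧ c.toNat ≤ 122) := by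
      intro hcc
      exact hl ⟨Char.le_def.mpr hcc.1, Char.le_def.mpr hcc.2⟩
    exact ⟨by omega, this⟩

-- A's output as a map of pvSeqA over the sorted uppercased characters
theorem pvA_eq (s : String) :
    alpha_seq s = String.ofList (PySem.Chars.join [',']
      ((PySem.List.sorted (PySem.Chars.upper s.toList) (fun c => c) false).map pvSeqA)) := by
  simp only [alpha_seq]
  rw [PySem.List.foldl_append_singleton_eq_map
    (fun letter => [PySem.Chars.upperChar letter] ++
      PySem.List.pyRepeat [PySem.Chars.lowerChar letter]
        (PySem.Chars.find "ABCDEFGHIJKLMNOPQRSTUVWXYZ".toList [letter]))]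
  rfl

-- B's output as a flatMap of replicated pvSeqB blocks over the codes 0..127
theorem pvB_eq (s : String) :
    alpha_seq_alt s = String.ofList (PySem.Chars.join [',']
      ((List.range 128).flatMap (fun k =>
        List.replicate ((PySem.Chars.upper s.toList).count (Char.ofNat k)) (pvSeqB k)))) := by
  simp only [alpha_seq_alt]
  have hcounts : ∀ c : Char,
      ((PySem.Chars.upper s.toList).foldl (fun counts ch =>
        counts.insert ch ((counts.getD ch 0) + 1))
        (PySem.Dict.empty : PySem.Dict Char Int)).getD c 0
      = (((PySem.Chars.upper s.toList).count c : Int)) := by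
    intro c
    rw [PySem.Dict.getD_foldl_insert_add_one]
    simp [pysem]
  rw [PySem.List.pyRange_one]
  rw [List.foldl_map]
  rw [PySem.List.foldl_congr_mem _ _
    (fun (parts : List (List Char)) (k : Nat) =>
      parts ++ List.replicate ((PySem.Chars.upper s.toList).count (Char.ofNat k)) (pvSeqB k)) _ ?_]
  · rw [PySem.List.foldl_append_eq_flatMap]
    rfl
  · intro acc k hk
    simp only [hcounts, pvSeqB, zero_add, Int.toNat_natCast, PySem.List.pyRepeat_singleton]

-- ===== VERDICT (by name: the statement is the Claim_ definition above) =====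
theorem alpha_seq_spec : Claim_equal_alpha_seq := by
  intro s hdom
  unfold Spec_alpha_seq
  have hdom' : ∀ c ∈ s.toList, c.toNat ≤ 126 := by
    intro c hc
    have := List.all_eq_true.mp hdom c hc
    simp only [pvDomChar, Bool.or_eq_true, Bool.and_eq_true, decide_eq_true_eq,
      Nat.le_iff_lt_or_eq, beq_iff_eq] at this
    omega
  set u := PySem.Chars.upper s.toList with hu
  have hlt : ∀ c ∈ u, c.toNat < 128 := by
    intro c hc
    obtain ⟨x, hx, rfl⟩ := List.mem_map.mp hc
    exact (pvUpDom x (hdom' x hx)).1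
  have hnl : ∀ c ∈ u, ¬ (97 ≤ c.toNat ∧ c.toNat ≤ 122) := by
    intro c hc
    obtain ⟨x, hx, rfl⟩ := List.mem_map.mp hc
    exact (pvUpDom x (hdom' x hx)).2
  rw [pvA_eq, pvB_eq]
  rw [← hu, pvSorted_eq_canon u hlt]
  congr 2
  simp only [pvCanon, List.map_flatMap]
  apply List.flatMap_congr
  intro k hk
  have hk128 : k < 128 := List.mem_range.mp hk
  rw [List.map_replicate]
  by_cases h0 : u.count (Char.ofNat k) = 0
  · simp [h0]
  · congr 1
    have hmem : Char.ofNat k ∈ u := List.count_pos_iff.mp (by omega)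
    have := hnl (Char.ofNat k) hmem
    rw [pvToNat_ofNat k hk128] at this
    exact pvSeq_eq k hk128 this
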